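-- pv_equiv track=rewrite | github.com/KDenis72/PYTHON100 | 09_for.py | init_lst
-- ===== SOURCE A (Python) =====
-- def init_lst(nn1, n1):
--     lstPos1 = [1 for _ in range(nn1)]
--
--     for i in range(nn1, n1):
--         ss = 0
--         for j in range(i - nn1, i):
--             ss += lstPos1[j]
--         lstPos1.append(ss)
--
--     return lstPos1
-- ===== SOURCE B (Python) =====
-- def init_lst(nn1, n1):
--     out = [1] * max(nn1, 0)
--     s = len(out)              # running sum of the current window (0 if nn1 <= 0)
--     for _ in range(max(n1 - nn1, 0)):
--         out.append(s)
--         if nn1 > 0: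
--             s += out[-1] - out[-1 - nn1]
--     return out
-- ===== Notes on version B (the rewrite author's own statement) =====
-- stated objective: faster
-- what changed: Replaces the nested re-summation of the previous nn1 terms by a single pass maintaining a sliding-window running sum updated in O(1) per term; intended as faster (O(n1-nn1) vs O((n1-nn1)*nn1)), measured ~2.8x at the largest size both finished.
import Mathlib
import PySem

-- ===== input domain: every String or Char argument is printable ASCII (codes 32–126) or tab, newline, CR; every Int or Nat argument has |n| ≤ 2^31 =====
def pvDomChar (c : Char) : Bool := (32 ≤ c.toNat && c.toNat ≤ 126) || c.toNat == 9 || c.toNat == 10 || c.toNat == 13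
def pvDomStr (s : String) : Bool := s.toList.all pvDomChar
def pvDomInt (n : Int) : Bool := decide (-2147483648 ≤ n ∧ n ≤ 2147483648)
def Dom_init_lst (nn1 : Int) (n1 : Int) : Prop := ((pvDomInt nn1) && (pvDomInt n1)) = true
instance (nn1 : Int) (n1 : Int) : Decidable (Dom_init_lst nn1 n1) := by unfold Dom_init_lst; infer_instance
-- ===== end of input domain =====

-- B replaces A's nested re-summation of the previous nn1 terms by a sliding-window
-- running sum updated in O(1) per term (intended as faster; measured ~2.8x at the
-- largest input size both implementations finished).


-- ===== PORT A =====
-- one iteration of A's outer loop: ss = sum of lstPos1[j] for j in range(i-nn1, i); append ss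
def pvStepA (nn1 : Int) (lst : List Int) (i : Int) : List Int :=
  lst ++ [(PySem.List.pyRange (i - nn1) i 1).foldl
            (fun ss j => ss + PySem.List.pyGetD lst j 0) 0]

def init_lst (nn1 : Int) (n1 : Int) : List Int :=
  (PySem.List.pyRange nn1 n1 1).foldl (pvStepA nn1)
    ((PySem.List.pyRange 0 nn1 1).map (fun _ => (1 : Int)))

-- ===== PORT B =====
-- one iteration of B's loop: append s; if nn1 > 0 then s += out[-1] - out[-1-nn1]
def pvStepB (nn1 : Int) (st : List Int × Int) : List Int × Int :=
  let out' := st.1 ++ [st.2]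
  (out', if 0 < nn1 then
           st.2 + PySem.List.pyGetD out' (-1) 0 - PySem.List.pyGetD out' (-1 - nn1) 0
         else st.2)

def init_lst_alt (nn1 : Int) (n1 : Int) : List Int :=
  ((PySem.List.pyRange 0 (max (n1 - nn1) 0) 1).foldl (fun st _ => pvStepB nn1 st)
    (List.replicate (max nn1 0).toNat (1 : Int),
     ((List.replicate (max nn1 0).toNat (1 : Int)).length : Int))).1

-- ===== PRECONDITION & SPEC =====
def Spec_init_lst (nn1 : Int) (n1 : Int) (out : List Int) : Prop := out = init_lst_alt nn1 n1
instance (nn1 : Int) (n1 : Int) (out : List Int) : Decidable (Spec_init_lst nn1 n1 out) := by unfold Spec_init_lst; infer_instance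

-- ===== CLAIM (what is proved, stated in full; the proofs are below) =====
def Claim_equal_init_lst : Prop := ∀ (nn1 : Int) (n1 : Int), Dom_init_lst nn1 n1 → Spec_init_lst nn1 n1 (init_lst nn1 n1)

-- ===== LEMMAS AND PROOFS =====

-- B's loop ignores the range element: the fold is an iterate of pvStepB
lemma foldl_ignore (g : List Int × Int → List Int × Int) :
    ∀ (l : List Int) (st : List Int × Int),
      l.foldl (fun st _ => g st) st = g^[l.length] st := by
  intro l
  induction l with
  | nil => intro st; simp
  | cons x xs ih => intro st; simp [ih, Function.iterate_succ_apply]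

-- a range's upper bound can be normalised to start + length
lemma pyRange_norm (a b : Int) :
    PySem.List.pyRange a b 1 = PySem.List.pyRange a (a + ((b - a).toNat : Int)) 1 := by
  rw [PySem.List.pyRange_one, PySem.List.pyRange_one]
  have h : ((a + ((b - a).toNat : Int)) - a).toNat = (b - a).toNat := by omega
  rw [h]

-- A's inner loop computes the sum of the last nn1 elements (nn1 > 0, window full)
lemma innerSum (nn1 : Int) (L : List Int) (h : nn1 ≤ (L.length : Int)) (h0 : 0 < nn1) :
    (PySem.List.pyRange ((L.length : Int) - nn1) (L.length : Int) 1).foldl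
      (fun ss j => ss + PySem.List.pyGetD L j 0) 0
    = (L.drop (L.length - nn1.toNat)).sum := by
  rw [PySem.List.foldl_pyRange_pyGetD' L 0 (fun a v => a + v) 0
        (show (0 : Int) ≤ (L.length : Int) - nn1 by omega)]
  have harg : ((L.length : Int) - nn1).toNat = L.length - nn1.toNat := by omega
  rw [harg]
  exact (List.sum_eq_foldl).symm

-- window-sum update: dropping one element and appending s
lemma window_shift (L : List Int) (s : Int) (m : Nat) (hm : m < L.length)
    (hs : s = (L.drop m).sum) :
    ((L ++ [s]).drop (m + 1)).sum = s + s - L[m] := by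
  have hdrop : L.drop m = L[m] :: L.drop (m + 1) := List.drop_eq_getElem_cons hm
  have h1 : (L ++ [s]).drop (m + 1) = L.drop (m + 1) ++ [s] := by
    rw [List.drop_append_of_le_length (by omega)]
  have h2 : (L.drop m).sum = L[m] + (L.drop (m + 1)).sum := by
    rw [hdrop, List.sum_cons]
  rw [h1, List.sum_append, List.sum_cons, List.sum_nil]
  omega

-- main loop correspondence, nn1 > 0 case
lemma main_pos (nn1 : Int) (h0 : 0 < nn1) :
    ∀ (k : Nat) (L : List Int) (s : Int), nn1 ≤ (L.length : Int) →
      s = (L.drop (L.length - nn1.toNat)).sum →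
      (PySem.List.pyRange (L.length : Int) ((L.length : Int) + (k : Int)) 1).foldl
        (pvStepA nn1) L
      = ((pvStepB nn1)^[k] (L, s)).1 := by
  intro k
  induction k with
  | zero =>
    intro L s _ _
    rw [PySem.List.pyRange_one_eq_nil (by omega)]
    simp
  | succ k ih =>
    intro L s hlen hs
    rw [PySem.List.pyRange_one_cons (by omega), List.foldl_cons]
    have hA : pvStepA nn1 L (L.length : Int) = L ++ [s] := by
      unfold pvStepA
      rw [innerSum nn1 L hlen h0, hs]
    have hwin : nn1.toNat ≤ L.length := by omega
    have hm : L.length - nn1.toNat < L.length := by omega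
    have hB : pvStepB nn1 (L, s) = (L ++ [s],
        s + s - L[L.length - nn1.toNat]'hm) := by
      unfold pvStepB
      simp only [if_pos h0]
      have hne : (L : List Int) ++ [s] ≠ [] := by simp
      have h1 : PySem.List.pyGetD (L ++ [s]) (-1) 0 = s :=
        PySem.List.pyGetD_neg_one_append_singleton ..
      have hk : (-1 - nn1) = -((nn1.toNat + 1 : Nat) : Int) := by omega
      have h2 : PySem.List.pyGetD (L ++ [s]) (-1 - nn1) 0
          = (L ++ [s])[(L ++ [s]).length - (nn1.toNat + 1)]'(by simp) := by
        rw [hk]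
        exact PySem.List.pyGetD_neg_natCast _ _ _ (by omega) (by simp; omega)
      have h3 : (L ++ [s])[(L ++ [s]).length - (nn1.toNat + 1)]'(by simp)
          = L[L.length - nn1.toNat]'hm := by
        have : (L ++ [s]).length - (nn1.toNat + 1) = L.length - nn1.toNat := by
          simp
        simp only [this]
        rw [List.getElem_append_left hm]
      rw [h1, h2, h3]
    rw [hA]
    have hlen' : ((L ++ [s]).length : Int) = (L.length : Int) + 1 := by simp
    have step : (PySem.List.pyRange ((L.length : Int) + 1)
          ((L.length : Int) + ((k : Int) + 1)) 1).foldl (pvStepA nn1) (L ++ [s])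
        = ((pvStepB nn1)^[k] (L ++ [s], s + s - L[L.length - nn1.toNat]'hm)).1 := by
      have := ih (L ++ [s]) (s + s - L[L.length - nn1.toNat]'hm)
        (by simp; omega)
        (by
          have heq : (L ++ [s]).length - nn1.toNat = (L.length - nn1.toNat) + 1 := by
            simp; omega
          rw [heq, window_shift L s (L.length - nn1.toNat) hm hs])
      rw [hlen'] at this
      convert this using 3
      omega
    have harg : (L.length : Int) + ((k : Int) + 1) = (L.length : Int) + ((k + 1 : Nat) : Int) := by
      push_cast; ring
    rw [← harg] at *
    rw [step, Function.iterate_succ_apply, hB]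

-- nn1 ≤ 0: A appends a 0 for every loop iteration
lemma main_nonpos_A (nn1 : Int) (h0 : nn1 ≤ 0) :
    ∀ (l : List Int) (L : List Int),
      l.foldl (pvStepA nn1) L = L ++ List.replicate l.length 0 := by
  intro l
  induction l with
  | nil => intro L; simp
  | cons x xs ih =>
    intro L
    have hA : pvStepA nn1 L x = L ++ [0] := by
      unfold pvStepA
      rw [PySem.List.pyRange_one_eq_nil (by omega)]
      simp
    rw [List.foldl_cons, hA, ih]
    simp [List.replicate_succ]

-- nn1 ≤ 0: B appends a 0 for every loop iteration (s stays 0)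
lemma main_nonpos_B (nn1 : Int) (h0 : nn1 ≤ 0) :
    ∀ (k : Nat) (L : List Int),
      (pvStepB nn1)^[k] (L, 0) = (L ++ List.replicate k 0, 0) := by
  intro k
  induction k with
  | zero => intro L; simp
  | succ k ih =>
    intro L
    rw [Function.iterate_succ_apply]
    have hB : pvStepB nn1 (L, (0 : Int)) = (L ++ [0], 0) := by
      unfold pvStepB
      simp [if_neg (by omega : ¬ (0 : Int) < nn1)]
    rw [hB, ih, List.append_assoc]
    rfl

-- ===== VERDICT (by name: the statement is the Claim_ definition above) =====
theorem init_lst_spec : Claim_equal_init_lst := by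
  intro nn1 n1 _
  unfold Spec_init_lst init_lst init_lst_alt
  rw [foldl_ignore (pvStepB nn1), PySem.List.length_pyRange_one]
  by_cases h0 : 0 < nn1
  · have hinit : (PySem.List.pyRange 0 nn1 1).map (fun _ => (1 : Int))
        = List.replicate (max nn1 0).toNat 1 := by
      rw [List.eq_replicate_iff]
      constructor
      · rw [List.length_map, PySem.List.length_pyRange_one]; omega
      · intro b hb
        simp at hb
        omega
    rw [hinit]
    have hk : (max (n1 - nn1) 0 - 0).toNat = (n1 - nn1).toNat := by omega
    rw [hk, pyRange_norm nn1 n1]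
    have hL : ((List.replicate (max nn1 0).toNat (1 : Int)).length : Int) = nn1 := by
      simp; omega
    rw [show PySem.List.pyRange nn1 (nn1 + ((n1 - nn1).toNat : Int)) 1
          = PySem.List.pyRange
              ((List.replicate (max nn1 0).toNat (1 : Int)).length : Int)
              (((List.replicate (max nn1 0).toNat (1 : Int)).length : Int)
                + ((n1 - nn1).toNat : Int)) 1 from by rw [hL]]
    exact main_pos nn1 h0 (n1 - nn1).toNat _ _
      (by simp)
      (by
        have hz : (List.replicate (max nn1 0).toNat (1 : Int)).length - nn1.toNat = 0 := by
          simp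
        rw [hz, List.drop_zero, List.sum_replicate]
        simp)
  · have hinit : (PySem.List.pyRange 0 nn1 1).map (fun _ => (1 : Int)) = [] := by
      rw [PySem.List.pyRange_one_eq_nil (by omega)]
      simp
    have hrep : List.replicate (max nn1 0).toNat (1 : Int) = ([] : List Int) := by
      have hz : (max nn1 0).toNat = 0 := by omega
      simp [hz]
    rw [hinit, hrep, main_nonpos_A nn1 (by omega)]
    simp only [List.length_nil, Nat.cast_zero, List.nil_append]
    rw [main_nonpos_B nn1 (by omega)]
    simp only [List.nil_append]
    rw [PySem.List.length_pyRange_one]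
    congr 1
    omega
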